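-- pv_equiv track=rewrite | github.com/bencharoenwong/parallax-workflows | skills/load-house-view/regression-corpus/run_regression.py | check_contains
-- ===== SOURCE A (Python) =====
-- def check_contains(target_list, needle_list, case_insensitive=True):
--     """Every needle must appear as substring in at least one element of target_list."""
--     missing = []
--     if not target_list:
--         target_list = []
--     haystack = [str(x).lower() if case_insensitive else str(x) for x in target_list]
--     for needle in needle_list or []:
--         n = needle.lower() if case_insensitive else needle
--         if not any(n in h for h in haystack):
--             missing.append(needle)
--     return missing
-- ===== SOURCE B (Python) =====
-- def check_contains(target_list, needle_list, case_insensitive=True):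
--     """Every needle must appear as substring in at least one element of target_list.
--
--     Inverted traversal: iterate the haystack once, pruning the still-missing
--     needles as they are found (with an early exit when none remain)."""
--     pending = [((n.lower() if case_insensitive else n), n) for n in (needle_list or [])]
--     for x in (target_list or []):
--         if not pending:
--             break
--         h = str(x).lower() if case_insensitive else str(x)
--         pending = [kn for kn in pending if kn[0] not in h]
--     return [kn[1] for kn in pending]
-- ===== Notes on version B (the rewrite author's own statement) =====
-- stated objective: alternative
-- what changed: Inverts the loop nesting: instead of scanning the whole haystack per needle, B makes one pass over the haystack, pruning a pending list of (lowered key, needle) pairs and exiting early once every needle has been found.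
import Mathlib
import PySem

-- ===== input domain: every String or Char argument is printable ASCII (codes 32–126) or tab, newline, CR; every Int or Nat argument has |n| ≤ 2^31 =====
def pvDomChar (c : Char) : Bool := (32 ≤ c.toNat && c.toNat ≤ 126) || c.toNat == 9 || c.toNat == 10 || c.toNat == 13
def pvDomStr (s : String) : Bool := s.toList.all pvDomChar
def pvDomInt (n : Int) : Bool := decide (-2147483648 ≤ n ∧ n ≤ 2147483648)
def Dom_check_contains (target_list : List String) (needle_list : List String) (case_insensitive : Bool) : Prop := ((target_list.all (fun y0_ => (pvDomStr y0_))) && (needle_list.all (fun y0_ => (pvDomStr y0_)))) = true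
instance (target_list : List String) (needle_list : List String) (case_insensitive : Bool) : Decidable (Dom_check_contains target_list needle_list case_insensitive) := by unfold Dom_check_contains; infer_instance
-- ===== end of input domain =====

-- One honest line: B inverts the loop nesting (one haystack pass pruning a pending
-- needle list, with early exit) instead of scanning the whole haystack per needle.

-- ===== PORT A =====
def check_contains (target_list : List String) (needle_list : List String) (case_insensitive : Bool) : List String :=
  -- `if not target_list: target_list = []` is the identity on lists (empty stays empty)
  let haystack := target_list.map (fun x => if case_insensitive then PySem.Str.lower x else x)
  -- `needle_list or []` is the identity on lists as well
  needle_list.foldl (fun missing needle =>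
    let n := if case_insensitive then PySem.Str.lower needle else needle
    if haystack.any (fun h => PySem.Str.isIn n h) then missing
    else missing ++ [needle]) []

-- ===== PORT B =====
-- the haystack loop of Source B: prune `pending` by each element, stop when empty
def ccAltGo : List String → Bool → List (String × String) → List (String × String)
  | [], _, pending => pending
  | x :: rest, ci, pending =>
    if pending.isEmpty then pending
    else
      let h := if ci then PySem.Str.lower x else x
      ccAltGo rest ci (pending.filter (fun kn => !PySem.Str.isIn kn.1 h))

def check_contains_alt (target_list : List String) (needle_list : List String) (case_insensitive : Bool) : List String :=
  let pending := needle_list.map (fun n => ((if case_insensitive then PySem.Str.lower n else n), n))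
  (ccAltGo target_list case_insensitive pending).map Prod.snd

-- ===== PRECONDITION & SPEC =====
def Spec_check_contains (target_list : List String) (needle_list : List String) (case_insensitive : Bool) (out : List String) : Prop := out = check_contains_alt target_list needle_list case_insensitive
instance (target_list : List String) (needle_list : List String) (case_insensitive : Bool) (out : List String) : Decidable (Spec_check_contains target_list needle_list case_insensitive out) := by unfold Spec_check_contains; infer_instance

-- ===== CLAIM (what is proved, stated in full; the proofs are below) =====
def Claim_equal_check_contains : Prop := ∀ (target_list : List String) (needle_list : List String) (case_insensitive : Bool), Dom_check_contains target_list needle_list case_insensitive → Spec_check_contains target_list needle_list case_insensitive (check_contains target_list needle_list case_insensitive)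

-- ===== LEMMAS AND PROOFS =====

-- A's loop appends exactly the needles whose test fails: it is a filter
theorem foldl_skip_or_append (c : String → Bool) :
    ∀ (l : List String) (acc : List String),
      l.foldl (fun missing needle => if c needle then missing else missing ++ [needle]) acc
        = acc ++ l.filter (fun needle => !c needle) := by
  intro l
  induction l with
  | nil => intro acc; simp
  | cons a t ih =>
      intro acc
      by_cases h : c a = true
      · simp [List.foldl_cons, h, ih]
      · simp only [Bool.not_eq_true] at h
        simp [List.foldl_cons, h, ih]

-- B's haystack loop computes the same filter over the pending pairs
theorem ccAltGo_eq_filter (ci : Bool) :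
    ∀ (tl : List String) (pending : List (String × String)),
      ccAltGo tl ci pending
        = pending.filter (fun kn =>
            !(tl.map (fun x => if ci then PySem.Str.lower x else x)).any
              (fun h => PySem.Str.isIn kn.1 h)) := by
  intro tl
  induction tl with
  | nil => intro pending; simp [ccAltGo]
  | cons x rest ih =>
      intro pending
      by_cases hp : pending = []
      · simp [ccAltGo, hp]
      · have hne : pending.isEmpty = false := by simp [hp]
        simp only [ccAltGo, hne, Bool.false_eq_true, if_false, ih, List.filter_filter]
        apply List.filter_congr
        intro kn _
        simp [Bool.not_or, Bool.and_comm]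

-- ===== VERDICT (by name: the statement is the Claim_ definition above) =====
theorem check_contains_spec : Claim_equal_check_contains := by
  intro target_list needle_list case_insensitive _
  unfold Spec_check_contains check_contains check_contains_alt
  rw [foldl_skip_or_append]
  simp only [ccAltGo_eq_filter, List.filter_map, List.map_map]
  simp [Function.comp_def]
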